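-- pv_equiv track=rewrite | github.com/ferhatelmas/algo | codechef/practice/easy/holes.py | find_holes
-- ===== SOURCE A (Python) =====
-- def find_holes(word):
--     holes = 0
--     one = ["A", "D", "O", "P", "Q", "R"]
--     for c in word:
--         if c in one:
--             holes += 1
--         elif c == "B":
--             holes += 2
--
--     return holes
-- ===== SOURCE B (Python) =====
-- def find_holes(word):
--     cnt = {}
--     for c in word:
--         cnt[c] = cnt.get(c, 0) + 1
--     return 2 * cnt.get("B", 0) + sum(cnt.get(c, 0) for c in "ADOPQR")
-- ===== Notes on version B (the rewrite author's own statement) =====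
-- stated objective: alternative
-- what changed: Replaces the per-character branch-and-accumulate scan with a frequency-table pass (a dict counter) followed by a fixed arithmetic combination of seven lookups.
import Mathlib
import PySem

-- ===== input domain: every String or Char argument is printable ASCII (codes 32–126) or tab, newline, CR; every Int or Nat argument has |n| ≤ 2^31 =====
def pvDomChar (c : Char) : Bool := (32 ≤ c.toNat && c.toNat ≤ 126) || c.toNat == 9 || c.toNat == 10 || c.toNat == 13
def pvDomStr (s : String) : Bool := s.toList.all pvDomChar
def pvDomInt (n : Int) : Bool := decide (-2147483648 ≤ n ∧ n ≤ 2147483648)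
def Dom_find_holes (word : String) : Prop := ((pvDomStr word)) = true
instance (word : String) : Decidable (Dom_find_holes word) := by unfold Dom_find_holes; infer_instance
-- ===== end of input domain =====

-- B replaces A's per-character branch-and-accumulate scan with a frequency-table pass plus a fixed arithmetic combination of lookups (alternative decomposition, same cost).
-- ===== PORT A =====
-- port of A: scan the word, per character add 1 for a one-hole letter, 2 for 'B'
def find_holes (word : String) : Int :=
  let one : List Char := ['A', 'D', 'O', 'P', 'Q', 'R']
  word.toList.foldl
    (fun holes c =>
      if one.contains c then holes + 1
      else if c == 'B' then holes + 2
      else holes) 0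

-- ===== PORT B =====
-- port of B: build a character-frequency dict in one pass, then combine seven lookups
def find_holes_alt (word : String) : Int :=
  let cnt := word.toList.foldl (fun d c => d.insert c (d.getD c 0 + 1))
    (PySem.Dict.empty : PySem.Dict Char Int)
  2 * cnt.getD 'B' 0 + (("ADOPQR".toList.map (fun c => cnt.getD c 0)).sum)

-- ===== PRECONDITION & SPEC =====
def Spec_find_holes (word : String) (out : Int) : Prop := out = find_holes_alt word
instance (word : String) (out : Int) : Decidable (Spec_find_holes word out) := by unfold Spec_find_holes; infer_instance

-- ===== CLAIM (what is proved, stated in full; the proofs are below) =====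
def Claim_equal_find_holes : Prop := ∀ (word : String), Dom_find_holes word → Spec_find_holes word (find_holes word)

-- ===== LEMMAS AND PROOFS =====

theorem find_holes_foldA (l : List Char) (a : Int) :
    l.foldl
      (fun holes c =>
        if (['A', 'D', 'O', 'P', 'Q', 'R'] : List Char).contains c then holes + 1
        else if c == 'B' then holes + 2
        else holes) a
    = a + 2 * (l.count 'B' : Int)
      + ((l.count 'A' : Int) + (l.count 'D' : Int) + (l.count 'O' : Int)
         + (l.count 'P' : Int) + (l.count 'Q' : Int) + (l.count 'R' : Int)) := by
  induction l generalizing a with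
  | nil => simp
  | cons c t ih =>
    simp only [List.foldl_cons, List.count_cons, ih]
    by_cases hA : c = 'A'
    · subst hA; simp; ring
    by_cases hD : c = 'D'
    · subst hD; simp; ring
    by_cases hO : c = 'O'
    · subst hO; simp; ring
    by_cases hP : c = 'P'
    · subst hP; simp; ring
    by_cases hQ : c = 'Q'
    · subst hQ; simp; ring
    by_cases hR : c = 'R'
    · subst hR; simp; ring
    by_cases hB : c = 'B'
    · subst hB; simp; ring
    · simp [hA, hD, hO, hP, hQ, hR, hB]

-- ===== VERDICT (by name: the statement is the Claim_ definition above) =====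
theorem find_holes_spec : Claim_equal_find_holes := by
  intro word _
  unfold Spec_find_holes find_holes find_holes_alt
  simp only [find_holes_foldA, PySem.Dict.getD_foldl_insert_add_one, PySem.Dict.getD_empty]
  simp [List.map]
  ring
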